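-- pv_equiv track=rewrite | github.com/gregclermont/egress-filter | src/proxy/sudo.py | _join_sudo_log_lines
-- ===== SOURCE A (Python) =====
-- def _join_sudo_log_lines(lines) -> list[str]:
--     """Join multiline sudo log entries into single strings.
--
--     Sudo wraps long log lines; continuation lines start with whitespace.
--     """
--     entries = []
--     current = None
--     for line in lines:
--         stripped = line.rstrip("\n")
--         if not stripped:
--             continue
--         if stripped[0].isspace():
--             # Continuation line
--             if current is not None:
--                 current += " " + stripped.strip()
--         else:
--             if current is not None:
--                 entries.append(current)
--             current = stripped
--     if current is not None:
--         entries.append(current)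
--     return entries
-- ===== SOURCE B (Python) =====
-- def _join_sudo_log_lines(lines) -> list[str]:
--     """Join multiline sudo log entries into single strings.
--
--     Staged approach: clean and drop blank lines, locate the header
--     positions by index, then slice out each header's block and join it.
--     """
--     cleaned = [s for s in (line.rstrip("\n") for line in lines) if s]
--     headers = [i for i, s in enumerate(cleaned) if not s[0].isspace()]
--     ends = headers[1:] + [len(cleaned)]
--     entries = []
--     for h, e in zip(headers, ends):
--         block = cleaned[h:e]
--         entries.append(" ".join([block[0]] + [s.strip() for s in block[1:]]))
--     return entries
-- ===== Notes on version B (the rewrite author's own statement) =====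
-- stated objective: alternative
-- what changed: B replaces A's single-pass running-accumulator scan by staged passes: clean and drop blank lines, compute the index positions of header lines, then slice each header's block out of the cleaned list by index pair and join it.
import Mathlib
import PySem

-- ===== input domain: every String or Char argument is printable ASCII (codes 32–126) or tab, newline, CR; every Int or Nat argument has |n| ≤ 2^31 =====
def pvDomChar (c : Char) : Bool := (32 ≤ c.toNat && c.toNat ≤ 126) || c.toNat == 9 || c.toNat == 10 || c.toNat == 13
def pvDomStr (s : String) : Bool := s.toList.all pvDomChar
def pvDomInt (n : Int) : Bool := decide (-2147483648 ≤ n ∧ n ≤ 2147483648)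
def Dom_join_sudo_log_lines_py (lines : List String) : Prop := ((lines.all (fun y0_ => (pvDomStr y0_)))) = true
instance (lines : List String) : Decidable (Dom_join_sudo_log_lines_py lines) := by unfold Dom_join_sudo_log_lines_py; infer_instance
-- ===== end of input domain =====

-- B differs from A in decomposition: instead of A's one-pass scan with a running 'current' accumulator,
-- B cleans the lines, computes the index positions of the header lines, and slices each block out by index pair.

-- ===== PORT A =====
-- rstrip("\n"): drop the trailing run of '\n' characters (exact for this single-char argument)
def pvRstripNL (cs : List Char) : List Char := (cs.reverse.dropWhile (· == '\n')).reverse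

-- one iteration of A's for-loop over state (entries, current)
def pvStepA (st : List (List Char) × Option (List Char)) (line : String) :
    List (List Char) × Option (List Char) :=
  let stripped := pvRstripNL line.toList
  match stripped with
  | [] => st                                   -- "if not stripped: continue"
  | c :: _ =>
      if PySem.Chars.isspace c then            -- continuation line
        match st.2 with
        | none => st
        | some cur => (st.1, some (cur ++ [' '] ++ PySem.Chars.strip stripped))
      else                                     -- header line
        match st.2 with
        | none => (st.1, some stripped)
        | some cur => (st.1 ++ [cur], some stripped)

def join_sudo_log_lines_py (lines : List String) : List String :=
  let st := lines.foldl pvStepA ([], none)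
  let entries := match st.2 with
    | none => st.1
    | some cur => st.1 ++ [cur]
  entries.map (fun cs => String.ofList cs)

-- ===== PORT B =====
-- "not s[0].isspace()" on a cleaned (hence nonempty) line; headD's default is never read
def pvIsCont (s : List Char) : Bool := PySem.Chars.isspace (s.headD ' ')

def join_sudo_log_lines_py_alt (lines : List String) : List String :=
  let cleaned := (lines.map (fun l => pvRstripNL l.toList)).filter (fun s => !s.isEmpty)
  let headers := ((PySem.List.enumerate cleaned 0).filter (fun p => !pvIsCont p.2)).map (·.1)
  let ends := headers.drop 1 ++ [(cleaned.length : Int)]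
  (headers.zip ends).map (fun he =>
    match PySem.List.slice cleaned (some he.1) (some he.2) with
    | [] => ""                        -- unreachable: h < e always, so the block is nonempty
    | b0 :: rest => String.ofList (PySem.Chars.join [' '] (b0 :: rest.map PySem.Chars.strip)))

-- ===== PRECONDITION & SPEC =====
def Spec_join_sudo_log_lines_py (lines : List String) (out : List String) : Prop := out = join_sudo_log_lines_py_alt lines
instance (lines : List String) (out : List String) : Decidable (Spec_join_sudo_log_lines_py lines out) := by unfold Spec_join_sudo_log_lines_py; infer_instance

-- ===== CLAIM (what is proved, stated in full; the proofs are below) =====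
def Claim_equal_join_sudo_log_lines_py : Prop := ∀ (lines : List String), Dom_join_sudo_log_lines_py lines → Spec_join_sudo_log_lines_py lines (join_sudo_log_lines_py lines)

-- ===== LEMMAS AND PROOFS =====

-- the common reference: recursive grouping of the cleaned lines
def pvGrp : List (List Char) → List (List (List Char))
  | [] => []
  | c :: rest =>
    if pvIsCont c then pvGrp rest
    else (c :: (rest.takeWhile pvIsCont).map PySem.Chars.strip) :: pvGrp (rest.dropWhile pvIsCont)
termination_by cs => cs.length
decreasing_by
  · simp
  · have := List.length_dropWhile_le pvIsCont rest; simp; omega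

theorem pvGrp_nil : pvGrp [] = [] := by simp [pvGrp]

theorem pvGrp_cons_cont (c : List Char) (rest : List (List Char)) (h : pvIsCont c = true) :
    pvGrp (c :: rest) = pvGrp rest := by rw [pvGrp]; simp [h]

theorem pvGrp_cons_hdr (c : List Char) (rest : List (List Char)) (h : pvIsCont c = false) :
    pvGrp (c :: rest) =
      (c :: (rest.takeWhile pvIsCont).map PySem.Chars.strip) :: pvGrp (rest.dropWhile pvIsCont) := by
  rw [pvGrp]; simp [h]

theorem pvGrp_dropWhile (cs : List (List Char)) : pvGrp (cs.dropWhile pvIsCont) = pvGrp cs := by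
  induction cs with
  | nil => rfl
  | cons c rest ih =>
    by_cases h : pvIsCont c = true
    · rw [List.dropWhile_cons_of_pos h, pvGrp_cons_cont c rest h]; exact ih
    · rw [List.dropWhile_cons_of_neg h]

-- ---------- A side ----------

-- A's loop step with the cleaned line as argument
def pvStepAC (st : List (List Char) × Option (List Char)) (stripped : List Char) :
    List (List Char) × Option (List Char) :=
  match stripped with
  | [] => st
  | c :: _ =>
      if PySem.Chars.isspace c then
        match st.2 with
        | none => st
        | some cur => (st.1, some (cur ++ [' '] ++ PySem.Chars.strip stripped))
      else
        match st.2 with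
        | none => (st.1, some stripped)
        | some cur => (st.1 ++ [cur], some stripped)

theorem pvStepA_eq (st : List (List Char) × Option (List Char)) (line : String) :
    pvStepA st line = pvStepAC st (pvRstripNL line.toList) := rfl

-- groups[-1].append(x)
def pvAppendLast (gs : List (List (List Char))) (x : List Char) : List (List (List Char)) :=
  match gs with
  | [] => []
  | [g] => [g ++ [x]]
  | g :: rest => g :: pvAppendLast rest x

-- A's loop step on an already-cleaned line, over the list of groups
def pvStepG (gs : List (List (List Char))) (s : List Char) : List (List (List Char)) :=
  match s with
  | [] => gs
  | c :: _ =>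
      if PySem.Chars.isspace c then
        pvAppendLast gs (PySem.Chars.strip s)   -- pvAppendLast [] x = [], matching A's "no current" skip
      else
        gs ++ [[s]]

theorem pvAppendLast_snoc (hs : List (List (List Char))) (g : List (List Char)) (x : List Char) :
    pvAppendLast (hs ++ [g]) x = hs ++ [g ++ [x]] := by
  induction hs with
  | nil => rfl
  | cons a t ih =>
    cases t with
    | nil => rfl
    | cons b u => simpa [pvAppendLast] using ih

theorem pvJoin_snoc (g : List (List Char)) (x : List Char) (h : g ≠ []) :
    PySem.Chars.join [' '] (g ++ [x]) = PySem.Chars.join [' '] g ++ [' '] ++ x := by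
  induction g with
  | nil => exact absurd rfl h
  | cons a t ih =>
    cases t with
    | nil => simp [PySem.Chars.join_singleton, PySem.Chars.join_cons_cons]
    | cons b u =>
      have := ih (by simp)
      simp only [List.cons_append, PySem.Chars.join_cons_cons] at *
      rw [this]; simp

-- the relation between A's state and the group-list state maintained by the loops
def pvInv (st : List (List Char) × Option (List Char)) (gs : List (List (List Char))) : Prop :=
  (st.2 = none ∧ gs = [] ∧ st.1 = []) ∨
  (∃ hs g, g ≠ [] ∧ gs = hs ++ [g] ∧ st.2 = some (PySem.Chars.join [' '] g) ∧
    st.1 = hs.map (PySem.Chars.join [' ']))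

theorem pvStep_inv (st : List (List Char) × Option (List Char)) (gs : List (List (List Char)))
    (h : pvInv st gs) (s : List Char) : pvInv (pvStepAC st s) (pvStepG gs s) := by
  obtain ⟨e, cur⟩ := st
  rcases h with ⟨h2, hg, h1⟩ | ⟨hs, g, hne, hg, h2, h1⟩ <;> dsimp only at h2 h1 <;>
    subst h2 h1 hg <;> cases s <;> simp only [pvStepAC, pvStepG]
  · exact Or.inl ⟨rfl, rfl, rfl⟩
  · rename_i c rest
    by_cases hsp : PySem.Chars.isspace c = true
    · simp only [hsp, if_pos]
      exact Or.inl ⟨rfl, rfl, rfl⟩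
    · simp only [hsp, Bool.false_eq_true, if_false]
      exact Or.inr ⟨[], [c :: rest], by simp, by simp, by
        simp [PySem.Chars.join_singleton], by simp⟩
  · exact Or.inr ⟨hs, g, hne, rfl, rfl, rfl⟩
  · rename_i c rest
    by_cases hsp : PySem.Chars.isspace c = true
    · simp only [hsp, if_pos]
      refine Or.inr ⟨hs, g ++ [PySem.Chars.strip (c :: rest)], by simp, ?_, ?_, rfl⟩
      · exact pvAppendLast_snoc hs g _
      · simp [pvJoin_snoc g _ hne]
    · simp only [hsp, Bool.false_eq_true, if_false]
      exact Or.inr ⟨hs ++ [g], [c :: rest], by simp, by simp, by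
        simp [PySem.Chars.join_singleton], by simp⟩

theorem pvFold_inv (lines : List String) (st : List (List Char) × Option (List Char))
    (gs : List (List (List Char))) (h : pvInv st gs) :
    pvInv (lines.foldl pvStepA st)
      ((lines.map (fun l => pvRstripNL l.toList)).foldl pvStepG gs) := by
  induction lines generalizing st gs with
  | nil => exact h
  | cons l t ih =>
    simp only [List.map_cons, List.foldl_cons, pvStepA_eq]
    exact ih _ _ (pvStep_inv st gs h _)

-- pvStepG ignores empty (cleaned-away) lines, so folding over the filtered list is the same
theorem pvFoldG_filter (cs : List (List Char)) (gs : List (List (List Char))) :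
    cs.foldl pvStepG gs = (cs.filter (fun s => !s.isEmpty)).foldl pvStepG gs := by
  induction cs generalizing gs with
  | nil => rfl
  | cons c rest ih =>
    cases c with
    | nil => simpa [pvStepG] using ih gs
    | cons a t => simp only [List.foldl_cons, List.filter_cons, List.isEmpty_cons]; exact ih _

-- folding the group step over a cleaned list with an open last group
theorem pvFoldG_open (cs : List (List Char)) (hne : ∀ s ∈ cs, s ≠ []) :
    ∀ (hs : List (List (List Char))) (g : List (List Char)),
    cs.foldl pvStepG (hs ++ [g]) =
      hs ++ (g ++ (cs.takeWhile pvIsCont).map PySem.Chars.strip) :: pvGrp (cs.dropWhile pvIsCont) := by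
  induction cs with
  | nil => intro hs g; simp [pvGrp_nil]
  | cons s rest ih =>
    intro hs g
    obtain ⟨c, cs', rfl⟩ : ∃ c cs', s = c :: cs' := by
      cases s with
      | nil => exact absurd rfl (hne [] (by simp))
      | cons c cs' => exact ⟨c, cs', rfl⟩
    have hrest : ∀ t ∈ rest, t ≠ [] := fun t ht => hne t (by simp [ht])
    by_cases hsp : PySem.Chars.isspace c = true
    · have hstep : pvStepG (hs ++ [g]) (c :: cs') = hs ++ [g ++ [PySem.Chars.strip (c :: cs')]] := by
        unfold pvStepG
        simp only [hsp, if_pos]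
        cases hhs : hs ++ [g] with
        | nil => simp at hhs
        | cons a t => rw [← hhs]; exact pvAppendLast_snoc hs g _
      rw [List.foldl_cons, hstep, ih hrest hs (g ++ [PySem.Chars.strip (c :: cs')])]
      have hcont : pvIsCont (c :: cs') = true := by simpa [pvIsCont] using hsp
      simp [List.takeWhile_cons_of_pos hcont, List.dropWhile_cons_of_pos hcont]
    · have hcont : pvIsCont (c :: cs') = false := by simpa [pvIsCont] using hsp
      have hstep : pvStepG (hs ++ [g]) (c :: cs') = (hs ++ [g]) ++ [[c :: cs']] := by
        simp [pvStepG, hsp]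
      rw [List.foldl_cons, hstep, ih hrest (hs ++ [g]) [c :: cs']]
      rw [List.takeWhile_cons_of_neg (by simp [hcont]), List.dropWhile_cons_of_neg (by simp [hcont])]
      rw [pvGrp_cons_hdr (c :: cs') rest hcont]
      simp

-- folding the group step from the empty group list computes pvGrp
theorem pvFoldG_closed (cs : List (List Char)) (hne : ∀ s ∈ cs, s ≠ []) :
    cs.foldl pvStepG [] = pvGrp cs := by
  induction cs with
  | nil => exact pvGrp_nil.symm
  | cons s rest ih =>
    obtain ⟨c, cs', rfl⟩ : ∃ c cs', s = c :: cs' := by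
      cases s with
      | nil => exact absurd rfl (hne [] (by simp))
      | cons c cs' => exact ⟨c, cs', rfl⟩
    have hrest : ∀ t ∈ rest, t ≠ [] := fun t ht => hne t (by simp [ht])
    by_cases hsp : PySem.Chars.isspace c = true
    · have hcont : pvIsCont (c :: cs') = true := by simpa [pvIsCont] using hsp
      have hstep : pvStepG [] (c :: cs') = [] := by simp [pvStepG, hsp, pvAppendLast]
      rw [List.foldl_cons, hstep, ih hrest, pvGrp_cons_cont _ _ hcont]
    · have hcont : pvIsCont (c :: cs') = false := by simpa [pvIsCont] using hsp
      have hstep : pvStepG [] (c :: cs') = [] ++ [[c :: cs']] := by simp [pvStepG, hsp]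
      rw [List.foldl_cons, hstep, pvFoldG_open rest hrest [] [c :: cs'],
        pvGrp_cons_hdr (c :: cs') rest hcont]
      simp

theorem pvA_eq_grp (lines : List String) :
    join_sudo_log_lines_py lines =
      (pvGrp ((lines.map (fun l => pvRstripNL l.toList)).filter (fun s => !s.isEmpty))).map
        (fun g => String.ofList (PySem.Chars.join [' '] g)) := by
  unfold join_sudo_log_lines_py
  have hfold := pvFold_inv lines ([], none) [] (Or.inl ⟨rfl, rfl, rfl⟩)
  rw [pvFoldG_filter] at hfold
  have hne : ∀ s ∈ (lines.map (fun l => pvRstripNL l.toList)).filter (fun s => !s.isEmpty), s ≠ [] := by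
    intro s hs
    have := List.of_mem_filter hs
    simpa [List.isEmpty_iff] using this
  rw [pvFoldG_closed _ hne] at hfold
  rcases hfold with ⟨h2, hg, h1⟩ | ⟨hs, g, hne', hg, h2, h1⟩
  · simp [hg, h2, h1]
  · simp [hg, h2, h1, Function.comp_def]

-- ---------- B side ----------

-- the header positions of cs, counted from s (what B's enumerate/filter/map computes)
def pvHdrs : List (List Char) → Int → List Int
  | [], _ => []
  | c :: rest, s => (if pvIsCont c then [] else [s]) ++ pvHdrs rest (s + 1)

theorem pvHdrs_eq_filter (cs : List (List Char)) (s : Int) :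
    ((PySem.List.enumerate cs s).filter (fun p => !pvIsCont p.2)).map (·.1) = pvHdrs cs s := by
  induction cs generalizing s with
  | nil => rfl
  | cons c rest ih =>
    rw [PySem.List.enumerate_cons]
    by_cases h : pvIsCont c = true <;> simp [pvHdrs, h, ih]

theorem pvHdrs_shift (cs : List (List Char)) (s : Int) :
    pvHdrs cs (s + 1) = (pvHdrs cs s).map (· + 1) := by
  induction cs generalizing s with
  | nil => rfl
  | cons c rest ih => by_cases h : pvIsCont c = true <;> simp [pvHdrs, h, ih]

theorem pvHdrs_nonneg (cs : List (List Char)) (s : Int) (hs : 0 ≤ s) :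
    ∀ h ∈ pvHdrs cs s, 0 ≤ h := by
  induction cs generalizing s with
  | nil => intro h hh; simp [pvHdrs] at hh
  | cons c rest ih =>
    intro h hh
    by_cases hc : pvIsCont c = true <;> simp [pvHdrs, hc] at hh
    · exact ih (s + 1) (by omega) h hh
    · rcases hh with rfl | hh
      · exact hs
      · exact ih (s + 1) (by omega) h hh

theorem pvHdrs_nil_iff (cs : List (List Char)) (s : Int) (h : pvHdrs cs s = []) :
    cs.takeWhile pvIsCont = cs ∧ cs.dropWhile pvIsCont = [] := by
  induction cs generalizing s with
  | nil => simp
  | cons c rest ih =>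
    by_cases hc : pvIsCont c = true
    · simp only [pvHdrs, hc, if_pos, List.nil_append] at h
      obtain ⟨h1, h2⟩ := ih (s + 1) h
      simp [List.takeWhile_cons_of_pos hc, List.dropWhile_cons_of_pos hc, h1, h2]
    · simp [pvHdrs, hc] at h

theorem pvHdrs_head (cs : List (List Char)) (s : Int) (h0 : Int) (t : List Int)
    (h : pvHdrs cs s = h0 :: t) : h0 = s + ((cs.takeWhile pvIsCont).length : Int) := by
  induction cs generalizing s with
  | nil => simp [pvHdrs] at h
  | cons c rest ih =>
    by_cases hc : pvIsCont c = true
    · simp only [pvHdrs, hc, if_pos, List.nil_append] at h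
      have := ih (s + 1) h
      rw [List.takeWhile_cons_of_pos hc]
      simp only [List.length_cons] at this ⊢
      push_cast at this ⊢
      omega
    · simp only [pvHdrs, hc, if_neg, Bool.false_eq_true, not_false_iff, List.singleton_append,
        List.cons.injEq] at h
      rw [List.takeWhile_cons_of_neg (by simp [hc])]
      simp
      omega

-- one block of B: the slice between a header and the next boundary, tail stripped
def pvBlockOf (xs : List (List Char)) (he : Int × Int) : List (List Char) :=
  match PySem.List.slice xs (some he.1) (some he.2) with
  | [] => []
  | b0 :: rest => b0 :: rest.map PySem.Chars.strip

def pvBlocks (cs : List (List Char)) : List (List (List Char)) :=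
  ((pvHdrs cs 0).zip ((pvHdrs cs 0).drop 1 ++ [(cs.length : Int)])).map (pvBlockOf cs)

theorem pvSlice_cons_succ {α : Type} (x : α) (l : List α) (a b : Int) (ha : 0 ≤ a) (hb : 0 ≤ b) :
    PySem.List.slice (x :: l) (some (a + 1)) (some (b + 1)) = PySem.List.slice l (some a) (some b) := by
  rw [PySem.List.slice_toNat _ (by omega) (by omega), PySem.List.slice_toNat _ ha hb]
  have h1 : (a + 1).toNat = a.toNat + 1 := by omega
  have h2 : (b + 1).toNat - (a + 1).toNat = b.toNat - a.toNat := by omega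
  rw [h2, h1, List.drop_succ_cons]

-- shifted bounds over (c :: cs) slice out the corresponding blocks of cs
theorem pvBlocks_shift (c : List Char) (cs : List (List Char)) (ps : List (Int × Int))
    (h : ∀ p ∈ ps, 0 ≤ p.1 ∧ 0 ≤ p.2) :
    ps.map (pvBlockOf (c :: cs) ∘ Prod.map (· + 1) (· + 1)) = ps.map (pvBlockOf cs) := by
  apply List.map_congr_left
  intro p hp
  obtain ⟨h1, h2⟩ := h p hp
  simp only [Function.comp_def, Prod.map]
  unfold pvBlockOf
  rw [pvSlice_cons_succ _ _ _ _ h1 h2]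

-- the pairs zipped from the headers of cs have nonnegative components
theorem pvBounds_nonneg (cs : List (List Char)) (p : Int × Int)
    (hp : p ∈ (pvHdrs cs 0).zip ((pvHdrs cs 0).drop 1 ++ [(cs.length : Int)])) :
    0 ≤ p.1 ∧ 0 ≤ p.2 := by
  obtain ⟨hp1, hp2⟩ := List.of_mem_zip hp
  refine ⟨pvHdrs_nonneg cs 0 le_rfl p.1 hp1, ?_⟩
  rcases List.mem_append.1 hp2 with h | h
  · exact pvHdrs_nonneg cs 0 le_rfl p.2 (List.mem_of_mem_drop h)
  · simp at h; omega

-- take of the leading-continuation count is the takeWhile prefix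
theorem pvTake_takeWhile (cs : List (List Char)) :
    cs.take (cs.takeWhile pvIsCont).length = cs.takeWhile pvIsCont := by
  induction cs with
  | nil => rfl
  | cons c rest ih =>
    by_cases h : pvIsCont c = true
    · simp [List.takeWhile_cons_of_pos h, ih]
    · rw [List.takeWhile_cons_of_neg (by simp [h])]
      simp

theorem pvBlocks_eq_grp (cs : List (List Char)) : pvBlocks cs = pvGrp cs := by
  induction cs with
  | nil => simp [pvBlocks, pvHdrs, pvGrp_nil]
  | cons c rest ih =>
    have hlen : (((c :: rest).length : Nat) : Int) = (rest.length : Int) + 1 := by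
      push_cast [List.length_cons]; ring
    have hshift : pvHdrs rest 1 = (pvHdrs rest 0).map (· + 1) := by
      have := pvHdrs_shift rest 0
      simpa using this
    have hsing : ([(rest.length : Int) + 1] : List Int) = List.map (· + 1) [(rest.length : Int)] := rfl
    by_cases hc : pvIsCont c = true
    · -- leading continuation: headers shift by one, blocks are those of rest
      rw [pvGrp_cons_cont c rest hc]
      unfold pvBlocks
      have hh : pvHdrs (c :: rest) 0 = (pvHdrs rest 0).map (· + 1) := by
        simp [pvHdrs, hc, hshift]
      rw [hh, hlen, ← List.map_drop, hsing, ← List.map_append, List.zip_map, List.map_map]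
      have hmap := pvBlocks_shift c rest
        ((pvHdrs rest 0).zip ((pvHdrs rest 0).drop 1 ++ [(rest.length : Int)]))
        (pvBounds_nonneg rest)
      have : Prod.map (· + (1:Int)) (· + (1:Int)) = fun p : Int × Int => (p.1 + 1, p.2 + 1) := by
        funext p; rfl
      rw [hmap]
      exact ih
    · -- header line
      have hc' : pvIsCont c = false := by simpa using hc
      rw [pvGrp_cons_hdr c rest hc']
      unfold pvBlocks
      have hh : pvHdrs (c :: rest) 0 = 0 :: (pvHdrs rest 0).map (· + 1) := by
        simp [pvHdrs, hc', hshift]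
      rw [hh]
      cases hH : pvHdrs rest 0 with
      | nil =>
        -- no further header: a single block spanning everything
        obtain ⟨htw, hdw⟩ := pvHdrs_nil_iff rest 0 hH
        simp only [List.map_nil, List.drop_succ_cons, List.drop_nil, List.nil_append,
          List.zip_cons_cons, List.zip_nil_right, List.map_cons, List.map_nil]
        rw [hdw, pvGrp_nil]
        have hslice : PySem.List.slice (c :: rest) (some 0) (some (((c :: rest).length : Nat) : Int)) =
            c :: rest := by
          rw [PySem.List.slice_toNat _ le_rfl (by positivity)]
          simp
        unfold pvBlockOf
        simp only [hslice]
        rw [htw]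
      | cons h0 t =>
        have hh0 : h0 = ((rest.takeWhile pvIsCont).length : Int) := by
          have := pvHdrs_head rest 0 h0 t hH
          omega
        simp only [List.map_cons, List.drop_succ_cons, List.drop_zero, List.cons_append,
          List.zip_cons_cons, List.map_cons]
        congr 1
        · -- the first block is the header with its continuations
          unfold pvBlockOf
          have h0nn : 0 ≤ h0 := by rw [hh0]; positivity
          have hslice : PySem.List.slice (c :: rest) (some 0) (some (h0 + 1)) =
              c :: rest.takeWhile pvIsCont := by
            rw [PySem.List.slice_toNat _ le_rfl (by omega)]
            have ht : (h0 + 1).toNat = (rest.takeWhile pvIsCont).length + 1 := by omega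
            rw [ht]
            simp [pvTake_takeWhile]
          simp only [hslice]
        · -- the remaining blocks are those of rest; pvGrp skips rest's leading continuations
          rw [pvGrp_dropWhile rest, ← ih]
          have : ((c :: rest).length : Int) = (rest.length : Int) + 1 := hlen
          rw [this, hsing, ← List.map_append]
          have hcons : (h0 + 1) :: List.map (fun x : Int => x + 1) t =
              List.map (fun x : Int => x + 1) (h0 :: t) := rfl
          rw [hcons, List.zip_map, List.map_map]
          have hmap := pvBlocks_shift c rest ((h0 :: t).zip (t ++ [(rest.length : Int)]))
            (by intro p hp; apply pvBounds_nonneg rest p; rw [hH]; simpa using hp)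
          rw [hmap]
          unfold pvBlocks
          rw [hH]
          simp

theorem pvB_eq_grp (lines : List String) :
    join_sudo_log_lines_py_alt lines =
      (pvGrp ((lines.map (fun l => pvRstripNL l.toList)).filter (fun s => !s.isEmpty))).map
        (fun g => String.ofList (PySem.Chars.join [' '] g)) := by
  simp only [join_sudo_log_lines_py_alt]
  rw [pvHdrs_eq_filter]
  rw [← pvBlocks_eq_grp]
  unfold pvBlocks
  rw [List.map_map]
  apply List.map_congr_left
  intro p hp
  simp only [Function.comp_def]
  unfold pvBlockOf
  cases PySem.List.slice _ (some p.1) (some p.2) with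
  | nil => decide
  | cons b0 rest => rfl

-- ===== VERDICT (by name: the statement is the Claim_ definition above) =====
theorem join_sudo_log_lines_py_spec : Claim_equal_join_sudo_log_lines_py := by
  intro lines _
  unfold Spec_join_sudo_log_lines_py
  rw [pvA_eq_grp, pvB_eq_grp]
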